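-- pv_equiv track=rewrite | github.com/pypi-data/pypi-mirror-401 | packages/atlas-object-partitioning/atlas_object_partitioning-1.2.0-py3-none-any.whl/atlas_object_partitioning/partition.py | _format_index_ranges_with_edges
-- ===== SOURCE A (Python) =====
-- from typing import Dict, List, Optional, Tuple
--
-- def _format_index_ranges_with_edges(indices: List[int], edges: List[int]) -> str:
--     if not indices:
--         return "-"
--     ranges: List[Tuple[int, int]] = []
--     start = indices[0]
--     end = indices[0]
--     for value in indices[1:]:
--         if value == end + 1:
--             end = value
--         else:
--             ranges.append((start, end))
--             start = value
--             end = value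
--     ranges.append((start, end))
--     parts = []
--     for lo, hi in ranges:
--         lo_edge = edges[lo]
--         hi_edge = edges[hi + 1]
--         if lo == hi:
--             parts.append(f"{lo} [{lo_edge}, {hi_edge})")
--         else:
--             parts.append(f"{lo}-{hi} [{lo_edge}, {hi_edge})")
--     return ", ".join(parts)
-- ===== SOURCE B (Python) =====
-- from typing import List
--
--
-- def _format_index_ranges_with_edges(indices: List[int], edges: List[int]) -> str:
--     if not indices:
--         return "-"
--     n = len(indices)
--     # Staged: detect run boundaries positionally, then pair starts with ends.
--     starts = [k for k in range(n) if k == 0 or indices[k] != indices[k - 1] + 1]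
--     ends = [k for k in range(n) if k == n - 1 or indices[k + 1] != indices[k] + 1]
--     parts = []
--     for s, e in zip(starts, ends):
--         lo, hi = indices[s], indices[e]
--         label = f"{lo}" if lo == hi else f"{lo}-{hi}"
--         parts.append(f"{label} [{edges[lo]}, {edges[hi + 1]})")
--     return ", ".join(parts)
-- ===== Notes on version B (the rewrite author's own statement) =====
-- stated objective: alternative
-- what changed: B replaces A's stateful run-merging accumulator loop with a staged positional computation: two independent filters over range(n) detect run-start and run-end positions, zip pairs them, and each pair is formatted directly.
import Mathlib
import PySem

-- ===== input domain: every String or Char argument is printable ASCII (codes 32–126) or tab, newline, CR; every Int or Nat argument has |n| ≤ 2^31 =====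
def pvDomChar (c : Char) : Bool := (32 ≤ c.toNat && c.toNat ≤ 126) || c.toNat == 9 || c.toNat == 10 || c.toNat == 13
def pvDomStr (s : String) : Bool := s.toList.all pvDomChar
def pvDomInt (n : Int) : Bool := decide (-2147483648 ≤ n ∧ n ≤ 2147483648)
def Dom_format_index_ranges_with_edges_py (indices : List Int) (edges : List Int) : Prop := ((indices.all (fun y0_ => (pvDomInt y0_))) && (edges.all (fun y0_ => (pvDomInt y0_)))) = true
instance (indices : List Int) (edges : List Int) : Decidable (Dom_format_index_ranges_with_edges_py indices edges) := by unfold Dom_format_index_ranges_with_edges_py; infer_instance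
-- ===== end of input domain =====

-- B: staged re-implementation — detect run-start and run-end POSITIONS with two filtered
-- range passes, zip them, and format each (start,end) pair; same return value as A on Pre_.


-- ===== PORT A =====
-- literal transliteration of A: forward fold building (start, end, ranges), append the
-- last run, then a second pass formatting each range, joined with ", ".
-- edges[i] is ported as PySem.List.pyGetD edges i 0: Pre_ guarantees every access is in
-- range (where Python would raise IndexError the input is outside Pre_).
def format_index_ranges_with_edges_py (indices : List Int) (edges : List Int) : String :=
  match indices with
  | [] => "-"
  | i0 :: rest =>
    let st := rest.foldl
      (fun (acc : Int × Int × List (Int × Int)) value =>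
        if value = acc.2.1 + 1 then (acc.1, value, acc.2.2)
        else (value, value, acc.2.2 ++ [(acc.1, acc.2.1)]))
      (i0, i0, ([] : List (Int × Int)))
    let ranges := st.2.2 ++ [(st.1, st.2.1)]
    let parts := ranges.foldl
      (fun (ps : List String) r =>
        let lo := r.1; let hi := r.2
        let lo_edge := PySem.List.pyGetD edges lo 0
        let hi_edge := PySem.List.pyGetD edges (hi + 1) 0
        if lo = hi then
          ps ++ [PySem.Int.toStr lo ++ " [" ++ PySem.Int.toStr lo_edge ++ ", " ++ PySem.Int.toStr hi_edge ++ ")"]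
        else
          ps ++ [PySem.Int.toStr lo ++ "-" ++ PySem.Int.toStr hi ++ " [" ++ PySem.Int.toStr lo_edge ++ ", " ++ PySem.Int.toStr hi_edge ++ ")"]) ([] : List String)
    PySem.Str.join ", " parts

-- ===== PORT B =====
-- literal transliteration of B (Source B): two filter passes over range(n) computing the
-- run-start positions and run-end positions, zip them, format each pair, join.
def format_index_ranges_with_edges_py_alt (indices : List Int) (edges : List Int) : String :=
  if indices = [] then "-"
  else
    let n : Int := (indices.length : Int)
    let starts := (PySem.List.pyRange 0 n 1).filter
      (fun k => k == 0 || PySem.List.pyGetD indices k 0 != PySem.List.pyGetD indices (k - 1) 0 + 1)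
    let ends := (PySem.List.pyRange 0 n 1).filter
      (fun k => k == n - 1 || PySem.List.pyGetD indices (k + 1) 0 != PySem.List.pyGetD indices k 0 + 1)
    let parts := (starts.zip ends).foldl
      (fun (ps : List String) se =>
        let lo := PySem.List.pyGetD indices se.1 0
        let hi := PySem.List.pyGetD indices se.2 0
        let label := if lo = hi then PySem.Int.toStr lo else PySem.Int.toStr lo ++ "-" ++ PySem.Int.toStr hi
        ps ++ [label ++ " [" ++ PySem.Int.toStr (PySem.List.pyGetD edges lo 0) ++ ", "
               ++ PySem.Int.toStr (PySem.List.pyGetD edges (hi + 1) 0) ++ ")"]) ([] : List String)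
    PySem.Str.join ", " parts

-- ===== PRECONDITION & SPEC =====
-- Pre_ excludes exactly the inputs on which A raises IndexError: some accessed edge
-- index is out of Python range for edges.
def Pre_format_index_ranges_with_edges_py (indices : List Int) (edges : List Int) : Prop :=
  ∀ x ∈ indices, -(edges.length : Int) ≤ x ∧ x + 1 < (edges.length : Int)
instance (indices : List Int) (edges : List Int) : Decidable (Pre_format_index_ranges_with_edges_py indices edges) := by unfold Pre_format_index_ranges_with_edges_py; infer_instance

def pvWitness_format_index_ranges_with_edges_py : List Int × List Int := ([0, 1, 3], [10, 20, 30, 40, 50])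

def Spec_format_index_ranges_with_edges_py (indices : List Int) (edges : List Int) (out : String) : Prop := out = format_index_ranges_with_edges_py_alt indices edges
instance (indices : List Int) (edges : List Int) (out : String) : Decidable (Spec_format_index_ranges_with_edges_py indices edges out) := by unfold Spec_format_index_ranges_with_edges_py; infer_instance

-- ===== CLAIM (what is proved, stated in full; the proofs are below) =====
def Claim_equal_format_index_ranges_with_edges_py : Prop := ∀ (indices : List Int) (edges : List Int), Dom_format_index_ranges_with_edges_py indices edges → Pre_format_index_ranges_with_edges_py indices edges → Spec_format_index_ranges_with_edges_py indices edges (format_index_ranges_with_edges_py indices edges)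

-- ===== LEMMAS AND PROOFS =====

-- canonical run decomposition of a list of indices (front recursion with lookahead)
def pvRuns : List Int → List (Int × Int)
  | [] => []
  | x :: xs =>
    match pvRuns xs with
    | [] => [(x, x)]
    | (a, b) :: rs => if x + 1 = a then (x, b) :: rs else (x, x) :: (a, b) :: rs

theorem pvRuns_head (x : Int) (xs : List Int) :
    ∃ b rs, pvRuns (x :: xs) = (x, b) :: rs := by
  cases h : pvRuns xs with
  | nil => exact ⟨x, [], by simp [pvRuns, h]⟩
  | cons p rs =>
    by_cases hx : x + 1 = p.1
    · exact ⟨p.2, rs, by simp [pvRuns, h, hx]⟩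
    · exact ⟨x, p :: rs, by simp [pvRuns, h, hx]⟩

-- A's run accumulator as front recursion
def pvARuns (s e : Int) : List Int → List (Int × Int)
  | [] => [(s, e)]
  | v :: t => if v = e + 1 then pvARuns s v t else (s, e) :: pvARuns v v t

def pvSetStart (s : Int) : List (Int × Int) → List (Int × Int)
  | [] => []
  | (_, b) :: rs => (s, b) :: rs

theorem pvRuns_cons (x : Int) (xs : List Int) :
    pvRuns (x :: xs) = match pvRuns xs with
      | [] => [(x, x)]
      | (a, b) :: rs => if x + 1 = a then (x, b) :: rs else (x, x) :: (a, b) :: rs := rfl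

theorem pvARuns_eq_runs (xs : List Int) : ∀ (s e : Int),
    pvARuns s e xs = pvSetStart s (pvRuns (e :: xs)) := by
  induction xs with
  | nil => intro s e; simp [pvARuns, pvRuns, pvSetStart]
  | cons v t ih =>
    intro s e
    obtain ⟨b, rs, hvt⟩ := pvRuns_head v t
    rw [pvRuns_cons e (v :: t), hvt]
    dsimp only
    by_cases h : v = e + 1
    · have he : e + 1 = v := h.symm
      rw [if_pos he]
      have : pvARuns s e (v :: t) = pvARuns s v t := by
        simp only [pvARuns, if_pos h]
      rw [this, ih s v, hvt]
      simp [pvSetStart]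
    · have he : ¬ (e + 1 = v) := fun hc => h hc.symm
      rw [if_neg he]
      have : pvARuns s e (v :: t) = (s, e) :: pvARuns v v t := by
        simp only [pvARuns, if_neg h]
      rw [this, ih v v, hvt]
      simp [pvSetStart]

-- A's foldl loop (with trailing append) produces rs ++ pvARuns s e xs
theorem pvA_loop (xs : List Int) : ∀ (s e : Int) (rs : List (Int × Int)),
    (let st := xs.foldl
        (fun (acc : Int × Int × List (Int × Int)) value =>
          if value = acc.2.1 + 1 then (acc.1, value, acc.2.2)
          else (value, value, acc.2.2 ++ [(acc.1, acc.2.1)])) (s, e, rs)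
     st.2.2 ++ [(st.1, st.2.1)]) = rs ++ pvARuns s e xs := by
  induction xs with
  | nil => intro s e rs; simp [pvARuns]
  | cons v t ih =>
    intro s e rs
    by_cases h : v = e + 1
    · simp only [List.foldl_cons, h]
      simpa [pvARuns, h] using ih s v rs
    · simp only [List.foldl_cons, if_neg h]
      have := ih v v (rs ++ [(s, e)])
      simp only [this, pvARuns, if_neg h, List.append_assoc, List.cons_append, List.nil_append]

def pvFmt (edges : List Int) (r : Int × Int) : String :=
  let lo := r.1; let hi := r.2
  let lo_edge := PySem.List.pyGetD edges lo 0
  let hi_edge := PySem.List.pyGetD edges (hi + 1) 0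
  if lo = hi then
    PySem.Int.toStr lo ++ " [" ++ PySem.Int.toStr lo_edge ++ ", " ++ PySem.Int.toStr hi_edge ++ ")"
  else
    PySem.Int.toStr lo ++ "-" ++ PySem.Int.toStr hi ++ " [" ++ PySem.Int.toStr lo_edge ++ ", " ++ PySem.Int.toStr hi_edge ++ ")"

theorem pvA_characterization (i0 : Int) (rest edges : List Int) :
    format_index_ranges_with_edges_py (i0 :: rest) edges
      = PySem.Str.join ", " ((pvRuns (i0 :: rest)).map (pvFmt edges)) := by
  unfold format_index_ranges_with_edges_py
  have hloop := pvA_loop rest i0 i0 []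
  simp only [List.nil_append] at hloop
  have hmap : ∀ (ranges : List (Int × Int)) (init : List String),
      ranges.foldl
        (fun (ps : List String) r =>
          let lo := r.1; let hi := r.2
          let lo_edge := PySem.List.pyGetD edges lo 0
          let hi_edge := PySem.List.pyGetD edges (hi + 1) 0
          if lo = hi then
            ps ++ [PySem.Int.toStr lo ++ " [" ++ PySem.Int.toStr lo_edge ++ ", " ++ PySem.Int.toStr hi_edge ++ ")"]
          else
            ps ++ [PySem.Int.toStr lo ++ "-" ++ PySem.Int.toStr hi ++ " [" ++ PySem.Int.toStr lo_edge ++ ", " ++ PySem.Int.toStr hi_edge ++ ")"]) init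
        = init ++ ranges.map (pvFmt edges) := by
    intro ranges
    induction ranges with
    | nil => intro init; simp
    | cons r t ih =>
      intro init
      by_cases h : r.1 = r.2 <;> simp [ih, pvFmt, h]
  simp only [hloop, hmap, List.nil_append]
  have hstart : pvSetStart i0 (pvRuns (i0 :: rest)) = pvRuns (i0 :: rest) := by
    obtain ⟨b, rs, hr⟩ := pvRuns_head i0 rest
    simp [hr, pvSetStart]
  rw [pvARuns_eq_runs, hstart]

-- ===== B-side machinery: positional run boundaries =====

-- length of the first maximal consecutive run
def pvRunLen : List Int → Nat
  | [] => 0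
  | [_] => 1
  | x :: y :: t => if y = x + 1 then pvRunLen (y :: t) + 1 else 1

theorem pvRunLen_pos (xs : List Int) (h : xs ≠ []) : 1 ≤ pvRunLen xs := by
  match xs with
  | [_] => simp [pvRunLen]
  | x :: y :: t =>
    simp only [pvRunLen]
    by_cases hy : y = x + 1
    · rw [if_pos hy]; omega
    · rw [if_neg hy]

theorem pvRunLen_le (xs : List Int) : pvRunLen xs ≤ xs.length := by
  match xs with
  | [] => simp [pvRunLen]
  | [_] => simp [pvRunLen]
  | x :: y :: t =>
    have ih := pvRunLen_le (y :: t)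
    simp only [pvRunLen]
    by_cases hy : y = x + 1
    · rw [if_pos hy]; simp at ih ⊢; omega
    · rw [if_neg hy]; simp

-- inside the first run: consecutive values
theorem pvRunLen_step (xs : List Int) : ∀ k, 0 < k → k < pvRunLen xs →
    xs.getD k 0 = xs.getD (k - 1) 0 + 1 := by
  match xs with
  | [] => intro k h1 h2; simp [pvRunLen] at h2
  | [_] => intro k h1 h2; simp [pvRunLen] at h2; omega
  | x :: y :: t =>
    intro k h1 h2
    by_cases hy : y = x + 1
    · simp only [pvRunLen, if_pos hy] at h2
      rcases Nat.eq_or_lt_of_le h1 with h | h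
      · simp [← h, hy]
      · have := pvRunLen_step (y :: t) (k - 1) (by omega) (by omega)
        have e1 : (x :: y :: t).getD k 0 = (y :: t).getD (k - 1) 0 := by
          match k, h with
          | m + 1, _ => simp
        have e2 : (x :: y :: t).getD (k - 1) 0 = (y :: t).getD (k - 1 - 1) 0 := by
          match k, h with
          | m + 2, _ => simp
        rw [e1, e2, this]
    · simp only [pvRunLen, if_neg hy] at h2; omega

-- at the boundary: not consecutive
theorem pvRunLen_break (xs : List Int) (h : pvRunLen xs < xs.length) :
    xs.getD (pvRunLen xs) 0 ≠ xs.getD (pvRunLen xs - 1) 0 + 1 := by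
  match xs with
  | [] => simp [pvRunLen] at h
  | [_] => simp [pvRunLen] at h
  | x :: y :: t =>
    by_cases hy : y = x + 1
    · have hrl : pvRunLen (x :: y :: t) = pvRunLen (y :: t) + 1 := by
        simp only [pvRunLen]; rw [if_pos hy]
      rw [hrl] at h ⊢
      have hpos := pvRunLen_pos (y :: t) (by simp)
      have ih := pvRunLen_break (y :: t) (by simp at h ⊢; omega)
      have e1 : (x :: y :: t).getD (pvRunLen (y :: t) + 1) 0 = (y :: t).getD (pvRunLen (y :: t)) 0 := by simp
      have e2 : (x :: y :: t).getD (pvRunLen (y :: t) + 1 - 1) 0 = (y :: t).getD (pvRunLen (y :: t) - 1) 0 := by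
        cases hL : pvRunLen (y :: t) with
        | zero => omega
        | succ m => simp
      rw [e1, e2]; exact ih
    · have hrl : pvRunLen (x :: y :: t) = 1 := by
        simp only [pvRunLen]; rw [if_neg hy]
      rw [hrl]
      simpa using fun hc => hy hc

-- pvRuns via the first-run split
theorem pvRuns_split (xs : List Int) (h : xs ≠ []) :
    pvRuns xs = (xs.getD 0 0, xs.getD (pvRunLen xs - 1) 0) :: pvRuns (xs.drop (pvRunLen xs)) := by
  match xs with
  | [_] => simp [pvRuns, pvRunLen]
  | x :: y :: t =>
    have ih := pvRuns_split (y :: t) (by simp)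
    have hpos := pvRunLen_pos (y :: t) (by simp)
    rw [pvRuns_cons x (y :: t), ih]
    dsimp only
    by_cases hy : y = x + 1
    · have hx : x + 1 = (y :: t).getD 0 0 := by simp [hy]
      rw [if_pos hx]
      have hrl : pvRunLen (x :: y :: t) = pvRunLen (y :: t) + 1 := by
        simp only [pvRunLen]; rw [if_pos hy]
      rw [hrl]
      have e2 : (x :: y :: t).getD (pvRunLen (y :: t) + 1 - 1) 0 = (y :: t).getD (pvRunLen (y :: t) - 1) 0 := by
        cases hL : pvRunLen (y :: t) with
        | zero => omega
        | succ m => simp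
      rw [e2]
      simp
    · have hx : ¬ (x + 1 = (y :: t).getD 0 0) := by simpa using fun hc => hy hc.symm
      rw [if_neg hx]
      have hrl : pvRunLen (x :: y :: t) = 1 := by
        simp only [pvRunLen]; rw [if_neg hy]
      rw [hrl, ← ih]
      simp

-- Nat-level boundary predicates (the Python filter conditions at natural positions)
def pvQS (xs : List Int) (k : Nat) : Bool :=
  k == 0 || xs.getD k 0 != xs.getD (k - 1) 0 + 1
def pvQE (xs : List Int) (k : Nat) : Bool :=
  k == xs.length - 1 || xs.getD (k + 1) 0 != xs.getD k 0 + 1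

theorem pvFilter_singleton_zero (p : Nat → Bool) (L : Nat)
    (h0 : p 0 = true) (h : ∀ k, 0 < k → k < L → p k = false) (hL : 1 ≤ L) :
    (List.range L).filter p = [0] := by
  induction L with
  | zero => omega
  | succ m ih =>
    rw [List.range_succ, List.filter_append]
    cases Nat.eq_zero_or_pos m with
    | inl hm => subst hm; simp [h0]
    | inr hm =>
      rw [ih (fun k hk1 hk2 => h k hk1 (by omega)) hm]
      simp [h m hm (by omega)]

theorem pvFilter_singleton_last (p : Nat → Bool) (L : Nat)
    (h : ∀ k, k < L - 1 → p k = false) (hL : 1 ≤ L) (hLp : p (L - 1) = true) :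
    (List.range L).filter p = [L - 1] := by
  match L, hL with
  | m + 1, _ =>
    rw [List.range_succ, List.filter_append]
    have hnil : (List.range m).filter p = [] := by
      rw [List.filter_eq_nil_iff]
      intro a ha
      simp only [List.mem_range] at ha
      simp [h a (by omega)]
    rw [hnil]
    simpa using hLp

theorem pvGetD_drop (l : List Int) (n m : Nat) (d : Int) :
    (l.drop n).getD m d = l.getD (n + m) d := by
  simp [List.getD_eq_getElem?_getD, List.getElem?_drop]

-- run starts: position 0, then the tail's starts shifted by the first run's length
theorem pvStarts_split (xs : List Int) (h : xs ≠ []) :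
    (List.range xs.length).filter (pvQS xs)
      = 0 :: ((List.range (xs.length - pvRunLen xs)).filter (pvQS (xs.drop (pvRunLen xs)))).map
          (fun j => pvRunLen xs + j) := by
  have hL1 := pvRunLen_pos xs h
  have hLn := pvRunLen_le xs
  have hsplit : List.range xs.length
      = List.range (pvRunLen xs) ++ (List.range (xs.length - pvRunLen xs)).map (fun j => pvRunLen xs + j) := by
    calc List.range xs.length = List.range (pvRunLen xs + (xs.length - pvRunLen xs)) := by
          rw [Nat.add_sub_cancel' hLn]
      _ = _ := List.range_add
  rw [hsplit, List.filter_append, List.filter_map]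
  have h1 : (List.range (pvRunLen xs)).filter (pvQS xs) = [0] := by
    refine pvFilter_singleton_zero _ _ (by simp [pvQS]) ?_ hL1
    intro k hk1 hk2
    have hk0 : (k == 0) = false := by simpa using Nat.pos_iff_ne_zero.mp hk1
    have hst : (xs.getD k 0 != xs.getD (k - 1) 0 + 1) = false :=
      bne_eq_false_iff_eq.mpr (pvRunLen_step xs k hk1 hk2)
    show (k == 0 || xs.getD k 0 != xs.getD (k - 1) 0 + 1) = false
    rw [hk0, hst]
    rfl
  have h2 : (List.range (xs.length - pvRunLen xs)).filter (pvQS xs ∘ (fun j => pvRunLen xs + j))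
      = (List.range (xs.length - pvRunLen xs)).filter (pvQS (xs.drop (pvRunLen xs))) := by
    apply List.filter_congr
    intro j hj
    simp only [List.mem_range] at hj
    simp only [Function.comp_apply, pvQS, pvGetD_drop]
    cases j with
    | zero =>
      have hbreak := pvRunLen_break xs (by omega)
      have hb : ¬ xs[pvRunLen xs]?.getD 0 = xs[pvRunLen xs - 1]?.getD 0 + 1 := by
        simpa [List.getD_eq_getElem?_getD] using hbreak
      simp [hb]
    | succ m =>
      have e : pvRunLen xs + (m + 1) - 1 = pvRunLen xs + m := by omega
      simp [e]
  rw [h1, h2]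
  rfl

-- run ends: the first run's last position, then the tail's ends shifted
theorem pvEnds_split (xs : List Int) (h : xs ≠ []) :
    (List.range xs.length).filter (pvQE xs)
      = (pvRunLen xs - 1) :: ((List.range (xs.length - pvRunLen xs)).filter (pvQE (xs.drop (pvRunLen xs)))).map
          (fun j => pvRunLen xs + j) := by
  have hL1 := pvRunLen_pos xs h
  have hLn := pvRunLen_le xs
  have hsplit : List.range xs.length
      = List.range (pvRunLen xs) ++ (List.range (xs.length - pvRunLen xs)).map (fun j => pvRunLen xs + j) := by
    calc List.range xs.length = List.range (pvRunLen xs + (xs.length - pvRunLen xs)) := by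
          rw [Nat.add_sub_cancel' hLn]
      _ = _ := List.range_add
  rw [hsplit, List.filter_append, List.filter_map]
  have h1 : (List.range (pvRunLen xs)).filter (pvQE xs) = [pvRunLen xs - 1] := by
    refine pvFilter_singleton_last _ _ ?_ hL1 ?_
    · intro k hk
      have hstep := pvRunLen_step xs (k + 1) (by omega) (by omega)
      simp only [Nat.add_sub_cancel] at hstep
      have h1' : (k == xs.length - 1) = false := by simp; omega
      have h2' : (xs.getD (k + 1) 0 != xs.getD k 0 + 1) = false := bne_eq_false_iff_eq.mpr hstep
      show (k == xs.length - 1 || xs.getD (k + 1) 0 != xs.getD k 0 + 1) = false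
      rw [h1', h2']
      rfl
    · by_cases hEq : pvRunLen xs = xs.length
      · have : (pvRunLen xs - 1 == xs.length - 1) = true := by simp [hEq]
        show (pvRunLen xs - 1 == xs.length - 1 || _) = true
        rw [this]
        rfl
      · have hbreak := pvRunLen_break xs (by omega)
        have e : pvRunLen xs - 1 + 1 = pvRunLen xs := by omega
        have hb : (xs.getD (pvRunLen xs - 1 + 1) 0 != xs.getD (pvRunLen xs - 1) 0 + 1) = true := by
          rw [e]; exact bne_iff_ne.mpr hbreak
        show (pvRunLen xs - 1 == xs.length - 1 || xs.getD (pvRunLen xs - 1 + 1) 0 != xs.getD (pvRunLen xs - 1) 0 + 1) = true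
        rw [hb]
        simp
  have h2 : (List.range (xs.length - pvRunLen xs)).filter (pvQE xs ∘ (fun j => pvRunLen xs + j))
      = (List.range (xs.length - pvRunLen xs)).filter (pvQE (xs.drop (pvRunLen xs))) := by
    apply List.filter_congr
    intro j hj
    simp only [List.mem_range] at hj
    simp only [Function.comp_apply, pvQE, pvGetD_drop, List.length_drop]
    have e1 : pvRunLen xs + j + 1 = pvRunLen xs + (j + 1) := by omega
    have e2 : (pvRunLen xs + j == xs.length - 1) = (j == xs.length - pvRunLen xs - 1) := by
      by_cases hj' : j = xs.length - pvRunLen xs - 1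
      · subst hj'
        have hx : pvRunLen xs + (xs.length - pvRunLen xs - 1) = xs.length - 1 := by omega
        simp [hx]
      · have hx : ¬ (pvRunLen xs + j = xs.length - 1) := by omega
        simp [hj', hx]
    rw [e1, e2]
  rw [h1, h2]
  rfl

-- main positional lemma: zipped boundary positions read back the runs
theorem pvZip_runs_aux (N : Nat) : ∀ (xs : List Int), xs.length ≤ N → xs ≠ [] →
    (((List.range xs.length).filter (pvQS xs)).zip ((List.range xs.length).filter (pvQE xs))).map
      (fun p => (xs.getD p.1 0, xs.getD p.2 0)) = pvRuns xs := by
  induction N with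
  | zero => intro xs hlen hne; cases xs with
    | nil => exact absurd rfl hne
    | cons a t => simp at hlen
  | succ N ih =>
    intro xs hlen hne
    have hL1 := pvRunLen_pos xs hne
    have hLn := pvRunLen_le xs
    rw [pvStarts_split xs hne, pvEnds_split xs hne, pvRuns_split xs hne]
    rw [List.zip_cons_cons, List.map_cons, List.zip_map, List.map_map]
    congr 1
    set ys := xs.drop (pvRunLen xs) with hys
    have hylen : ys.length = xs.length - pvRunLen xs := by simp [hys]
    have hcomp : ((fun p => (xs.getD p.1 0, xs.getD p.2 0)) ∘
          Prod.map (fun j => pvRunLen xs + j) (fun j => pvRunLen xs + j))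
        = (fun (p : Nat × Nat) => (ys.getD p.1 0, ys.getD p.2 0)) := by
      funext p
      simp [Prod.map, hys]
    rw [hcomp]
    by_cases hy : ys = []
    · have : xs.length - pvRunLen xs = 0 := by
        have := hylen; rw [hy] at this; simpa using this.symm
      simp [this, hy, pvRuns]
    · rw [← hylen]
      exact ih ys (by omega) hy

theorem pvZip_runs (xs : List Int) (h : xs ≠ []) :
    (((List.range xs.length).filter (pvQS xs)).zip ((List.range xs.length).filter (pvQE xs))).map
      (fun p => (xs.getD p.1 0, xs.getD p.2 0)) = pvRuns xs := pvZip_runs_aux xs.length xs le_rfl h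

theorem pvB_fold (indices edges : List Int) (l : List (Int × Int)) (init : List String) :
    l.foldl
        (fun (ps : List String) se =>
          let lo := PySem.List.pyGetD indices se.1 0
          let hi := PySem.List.pyGetD indices se.2 0
          let label := if lo = hi then PySem.Int.toStr lo else PySem.Int.toStr lo ++ "-" ++ PySem.Int.toStr hi
          ps ++ [label ++ " [" ++ PySem.Int.toStr (PySem.List.pyGetD edges lo 0) ++ ", "
                 ++ PySem.Int.toStr (PySem.List.pyGetD edges (hi + 1) 0) ++ ")"]) init
      = init ++ l.map (fun se =>
          pvFmt edges (PySem.List.pyGetD indices se.1 0, PySem.List.pyGetD indices se.2 0)) := by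
  have hfun : (fun (ps : List String) (se : Int × Int) =>
        let lo := PySem.List.pyGetD indices se.1 0
        let hi := PySem.List.pyGetD indices se.2 0
        let label := if lo = hi then PySem.Int.toStr lo else PySem.Int.toStr lo ++ "-" ++ PySem.Int.toStr hi
        ps ++ [label ++ " [" ++ PySem.Int.toStr (PySem.List.pyGetD edges lo 0) ++ ", "
               ++ PySem.Int.toStr (PySem.List.pyGetD edges (hi + 1) 0) ++ ")"])
      = (fun (ps : List String) (se : Int × Int) =>
        ps ++ [pvFmt edges (PySem.List.pyGetD indices se.1 0, PySem.List.pyGetD indices se.2 0)]) := by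
    funext ps se
    by_cases hr : PySem.List.pyGetD indices se.1 0 = PySem.List.pyGetD indices se.2 0 <;>
      simp [pvFmt, hr, String.append_assoc]
  rw [hfun]
  exact PySem.List.foldl_append_singleton_eq_map _ l init

theorem pvB_characterization (indices edges : List Int) (h : indices ≠ []) :
    format_index_ranges_with_edges_py_alt indices edges
      = PySem.Str.join ", " ((pvRuns indices).map (pvFmt edges)) := by
  unfold format_index_ranges_with_edges_py_alt
  rw [if_neg h]
  have hrange : PySem.List.pyRange 0 (indices.length : Int) 1
      = (List.range indices.length).map (fun k : Nat => (k : Int)) := by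
    simpa using PySem.List.pyRange_zero_nat indices.length
  simp only [hrange, List.filter_map]
  have hS : (List.range indices.length).filter
        ((fun k : Int => k == 0 || PySem.List.pyGetD indices k 0 != PySem.List.pyGetD indices (k - 1) 0 + 1)
          ∘ (fun k : Nat => (k : Int)))
      = (List.range indices.length).filter (pvQS indices) := by
    apply List.filter_congr
    intro k _
    simp only [Function.comp_apply, pvQS]
    cases k with
    | zero => simp
    | succ m =>
      have e : ((m + 1 : Nat) : Int) - 1 = ((m : Nat) : Int) := by push_cast; ring
      rw [e, PySem.List.pyGetD_natCast indices (m + 1) 0, PySem.List.pyGetD_natCast indices m 0]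
      simp
      intro hc
      omega
  have hE : (List.range indices.length).filter
        ((fun k : Int => k == (indices.length : Int) - 1
            || PySem.List.pyGetD indices (k + 1) 0 != PySem.List.pyGetD indices k 0 + 1)
          ∘ (fun k : Nat => (k : Int)))
      = (List.range indices.length).filter (pvQE indices) := by
    apply List.filter_congr
    intro k hk
    simp only [List.mem_range] at hk
    simp only [Function.comp_apply, pvQE]
    have e1 : ((k : Nat) : Int) + 1 = ((k + 1 : Nat) : Int) := by push_cast; ring
    have e2 : (((k : Nat) : Int) == (indices.length : Int) - 1) = (k == indices.length - 1) := by
      by_cases hk' : k = indices.length - 1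
      · have hc : ((indices.length - 1 : Nat) : Int) = (indices.length : Int) - 1 := by omega
        simp [hk', hc]
      · have hc : ¬ (((k : Nat) : Int) = (indices.length : Int) - 1) := by omega
        simp [hk', hc]
    rw [e1, e2, PySem.List.pyGetD_natCast indices (k + 1) 0, PySem.List.pyGetD_natCast indices k 0]
  rw [hS, hE, List.zip_map, pvB_fold, List.map_map]
  have hcomp : ((fun se : Int × Int =>
        pvFmt edges (PySem.List.pyGetD indices se.1 0, PySem.List.pyGetD indices se.2 0))
          ∘ Prod.map (fun k : Nat => (k : Int)) (fun k : Nat => (k : Int)))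
      = (fun p : Nat × Nat => pvFmt edges (indices.getD p.1 0, indices.getD p.2 0)) := by
    funext p
    simp [Prod.map, PySem.List.pyGetD_natCast]
  rw [hcomp]
  have : (fun p : Nat × Nat => pvFmt edges (indices.getD p.1 0, indices.getD p.2 0))
      = (pvFmt edges) ∘ (fun p : Nat × Nat => (indices.getD p.1 0, indices.getD p.2 0)) := rfl
  rw [this, ← List.map_map, pvZip_runs indices h]
  simp

-- ===== VERDICT (by name: the statement is the Claim_ definition above) =====
theorem format_index_ranges_with_edges_py_spec : Claim_equal_format_index_ranges_with_edges_py := by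
  intro indices edges _ _
  unfold Spec_format_index_ranges_with_edges_py
  cases hi : indices with
  | nil => rfl
  | cons i0 rest =>
    rw [pvA_characterization, pvB_characterization (i0 :: rest) edges (by simp)]
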